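-- pv_equiv track=rewrite | github.com/jhonathaann/PLI_Pyomo | atribuição.py | aloca_trabalhos
-- ===== SOURCE A (Python) =====
-- def aloca_trabalhos(custos):
--     n = len(custos)
--     trabalhos_alocados = [None] * n
--     pessoas_usadas = [False] * n
--
--     for i in range(n):
--         menor_custo = float('inf')
--         melhor_pessoa = None
--
--         for j in range(n):
--             if not pessoas_usadas[j] and custos[i][j] < menor_custo:
--                 menor_custo = custos[i][j]
--                 melhor_pessoa = j
--
--         trabalhos_alocados[i] = melhor_pessoa
--         pessoas_usadas[melhor_pessoa] = True
--
--     return trabalhos_alocados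
-- ===== SOURCE B (Python) =====
-- def aloca_trabalhos(custos):
--     n = len(custos)
--     # precomputed preference order: persons sorted by (cost, index)
--     pref = [sorted(range(n), key=lambda j: (row[j], j)) for row in custos]
--     used = set()
--     alocados = []
--     for ordem in pref:
--         escolhido = next(j for j in ordem if j not in used)
--         used.add(escolhido)
--         alocados.append(escolhido)
--     return alocados
-- ===== Notes on version B (the rewrite author's own statement) =====
-- stated objective: alternative
-- what changed: Instead of A's repeated full-row min-scan over all persons for every job, B precomputes for each job a preference list of person indices sorted by (cost, index) and then assigns each job the first not-yet-used person from its list, maintaining a used-set.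
-- outside the precondition, e.g. on aloca_trabalhos([[46, 9, 140], [107]]): A returns [1, 0], B raises IndexError; on aloca_trabalhos([[1, 2], [3]]): A raises IndexError, B raises IndexError
import Mathlib
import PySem

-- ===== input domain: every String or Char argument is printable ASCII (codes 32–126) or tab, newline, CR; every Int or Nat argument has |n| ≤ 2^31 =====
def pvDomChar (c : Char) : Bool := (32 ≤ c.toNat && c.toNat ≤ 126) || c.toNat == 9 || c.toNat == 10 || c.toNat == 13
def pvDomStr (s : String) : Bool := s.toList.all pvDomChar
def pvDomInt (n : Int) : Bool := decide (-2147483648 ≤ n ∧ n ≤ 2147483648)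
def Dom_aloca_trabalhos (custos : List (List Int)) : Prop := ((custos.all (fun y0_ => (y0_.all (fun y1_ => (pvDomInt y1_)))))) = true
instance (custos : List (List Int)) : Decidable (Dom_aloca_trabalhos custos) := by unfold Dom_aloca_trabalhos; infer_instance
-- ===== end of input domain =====

-- B replaces A's repeated full-row min-scan by a precomputed per-job preference order
-- (persons sorted by (cost, index)) consulted with a first-free lookup (objective: alternative).

-- ===== PORT A =====
-- Literal port of A.  `menor_custo = float('inf')` is modelled as `none` (every Int cost
-- is < inf, so `none` behaves as +infinity in the comparison, exactly as in Python).
-- `trabalhos_alocados = [None]*n` filled at index i = 0,1,…,n-1 in order is built by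
-- appending.  The `none` branch of the match (melhor_pessoa is None, where Python would
-- raise TypeError) is unreachable: at step i at most i < n persons are used.
def aloca_trabalhos (custos : List (List Int)) : List Int :=
  let n := custos.length
  let fin := (PySem.List.pyRange 0 (n : Int)).foldl
    (fun (st : List Int × List Bool) i =>
      let row := PySem.List.pyGetD custos i []
      let mb := (PySem.List.pyRange 0 (n : Int)).foldl
        (fun (mb : Option Int × Option Int) j =>
          if (!(PySem.List.pyGetD st.2 j false)) &&
              (match mb.1 with
               | none => true
               | some m => decide (PySem.List.pyGetD row j 0 < m)) then
            (some (PySem.List.pyGetD row j 0), some j)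
          else mb)
        (none, none)
      match mb.2 with
      | some j => (st.1 ++ [j], st.2.set j.toNat true)
      | none => (st.1 ++ [0], st.2))
    ([], List.replicate n false)
  fin.1

-- ===== PORT B =====
-- Literal port of B.  sorted(range(n), key=lambda j: (row[j], j)) is sorted2 (tuple key);
-- `next(j for j in ordem if j not in used)` is find?; its StopIteration (`none`) branch is
-- unreachable (at most n-1 persons used when a job is processed).
def aloca_trabalhos_alt (custos : List (List Int)) : List Int :=
  let n := custos.length
  let pref := custos.map (fun row =>
    PySem.List.sorted2 (PySem.List.pyRange 0 (n : Int))
      (fun j => PySem.List.pyGetD row j 0) (fun j => j))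
  let fin := pref.foldl
    (fun (st : PySem.Set Int × List Int) ordem =>
      match ordem.find? (fun j => !(PySem.Set.contains st.1 j)) with
      | some j => (PySem.Set.add st.1 j, st.2 ++ [j])
      | none => st)
    (PySem.Set.empty, [])
  fin.2

-- ===== PRECONDITION & SPEC =====
-- Pre_ excludes ragged inputs where some row is shorter than len(custos): B raises
-- IndexError there (it sorts by row[j] for every j < n), and A either raises IndexError on
-- custos[i][j] or, when the out-of-range cells happen never to be probed because those
-- persons are already used, returns a value by that accident of its scan order.
def Pre_aloca_trabalhos (custos : List (List Int)) : Prop :=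
  ∀ row ∈ custos, custos.length ≤ row.length
instance (custos : List (List Int)) : Decidable (Pre_aloca_trabalhos custos) := by
  unfold Pre_aloca_trabalhos; infer_instance
def pvWitness_aloca_trabalhos : List (List Int) := [[1, 2], [3, 4]]
def Spec_aloca_trabalhos (custos : List (List Int)) (out : List Int) : Prop := out = aloca_trabalhos_alt custos
instance (custos : List (List Int)) (out : List Int) : Decidable (Spec_aloca_trabalhos custos out) := by unfold Spec_aloca_trabalhos; infer_instance

-- ===== CLAIM (what is proved, stated in full; the proofs are below) =====
def Claim_equal_aloca_trabalhos : Prop := ∀ (custos : List (List Int)), Dom_aloca_trabalhos custos → Pre_aloca_trabalhos custos → Spec_aloca_trabalhos custos (aloca_trabalhos custos)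

-- ===== LEMMAS AND PROOFS =====

-- cost of person j for a row, and the (cost, index) preference key
def pvCost (row : List Int) (j : Int) : Int := PySem.List.pyGetD row j 0
def pvKey (row : List Int) (j : Int) : Int ×ₗ Int := toLex (pvCost row j, j)

-- A's inner scan, with the availability test abstracted as p
def pvScan (p : Int → Bool) (row : List Int) (L : List Int)
    (st : Option Int × Option Int) : Option Int × Option Int :=
  L.foldl
    (fun (mb : Option Int × Option Int) j =>
      if p j &&
          (match mb.1 with
           | none => true
           | some m => decide (pvCost row j < m)) then
        (some (pvCost row j), some j)
      else mb) st

-- the per-row bodies of the two outer folds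
def pvFA (n : Nat) (st : List Int × List Bool) (row : List Int) : List Int × List Bool :=
  match (pvScan (fun j => !(PySem.List.pyGetD st.2 j false)) row
      (PySem.List.pyRange 0 (n : Int)) (none, none)).2 with
  | some j => (st.1 ++ [j], st.2.set j.toNat true)
  | none => (st.1 ++ [0], st.2)

def pvFB (n : Nat) (st : PySem.Set Int × List Int) (row : List Int) : PySem.Set Int × List Int :=
  match (PySem.List.sorted2 (PySem.List.pyRange 0 (n : Int))
      (fun j => PySem.List.pyGetD row j 0) (fun j => j)).find?
      (fun j => !(PySem.Set.contains st.1 j)) with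
  | some j => (PySem.Set.add st.1 j, st.2 ++ [j])
  | none => st

lemma foldl_index_eq {σ : Type} (custos : List (List Int)) (F : σ → List Int → σ) (init : σ) :
    (PySem.List.pyRange 0 (custos.length : Int)).foldl
        (fun st i => F st (PySem.List.pyGetD custos i [])) init =
      custos.foldl F init := by
  conv_rhs => rw [← PySem.List.map_pyGetD_pyRange_zero custos ([] : List Int)]
  rw [List.foldl_map]
  rfl

lemma portA_eq (custos : List (List Int)) :
    aloca_trabalhos custos =
      (custos.foldl (pvFA custos.length) ([], List.replicate custos.length false)).1 := by
  simp only [aloca_trabalhos]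
  exact congrArg Prod.fst (foldl_index_eq custos (pvFA custos.length) _)

lemma portB_eq (custos : List (List Int)) :
    aloca_trabalhos_alt custos =
      (custos.foldl (pvFB custos.length) (PySem.Set.empty, [])).2 := by
  simp only [aloca_trabalhos_alt]
  rw [List.foldl_map]
  rfl

-- sorted2 with keys k1, k2 is sorted with the lexicographic key
lemma sorted2_eq_sorted_lex (xs : List Int) (k1 k2 : Int → Int) :
    PySem.List.sorted2 xs k1 k2 =
      PySem.List.sorted xs (fun a => toLex (k1 a, k2 a)) := by
  have hb : (fun (a b : Int) => decide (k1 a < k1 b) || (!decide (k1 b < k1 a) && decide (k2 a < k2 b)))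
      = fun (a b : Int) => decide (toLex (k1 a, k2 a) < toLex (k1 b, k2 b)) := by
    funext a b
    rcases lt_trichotomy (k1 a) (k1 b) with h | h | h <;>
      simp [Prod.Lex.toLex_lt_toLex, h, lt_asymm]
  simp only [PySem.List.sorted2, PySem.List.sorted, Bool.false_eq_true, if_false, hb]

lemma pvKey_inj (row : List Int) (a b : Int) (h : pvKey row a = pvKey row b) : a = b := by
  unfold pvKey at h
  exact (Prod.mk.injEq _ _ _ _ ▸ toLex_inj.1 h).2

lemma find?_congr_mem {p q : Int → Bool} (l : List Int) (h : ∀ x ∈ l, p x = q x) :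
    l.find? p = l.find? q := by
  induction l with
  | nil => rfl
  | cons x t ih =>
    have hx := h x (by simp)
    rw [List.find?_cons, List.find?_cons, hx]
    cases q x
    · exact ih (fun y hy => h y (by simp [hy]))
    · rfl

lemma find?_min_of_pairwise (key : Int → Int ×ₗ Int) (p : Int → Bool) :
    ∀ (S : List Int), S.Pairwise (fun a b => key a < key b) → ∀ (j' : Int),
      S.find? p = some j' →
      p j' = true ∧ j' ∈ S ∧ ∀ k ∈ S, p k = true → key j' ≤ key k := by
  intro S
  induction S with
  | nil => intro _ j' h; simp at h
  | cons a t ih =>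
    intro hS j' h
    obtain ⟨hhead, htail⟩ := List.pairwise_cons.1 hS
    rw [List.find?_cons] at h
    by_cases hpa : p a = true
    · rw [hpa] at h
      cases h
      refine ⟨hpa, by simp, ?_⟩
      intro k hk _
      rcases List.mem_cons.1 hk with rfl | hk
      · exact le_refl _
      · exact le_of_lt (hhead k hk)
    · rw [Bool.eq_false_iff.2 hpa] at h
      obtain ⟨h1, h2, h3⟩ := ih htail j' h
      refine ⟨h1, List.mem_cons_of_mem _ h2, ?_⟩
      intro k hk hpk
      rcases List.mem_cons.1 hk with rfl | hk
      · exact absurd hpk hpa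
      · exact h3 k hk hpk

lemma pvScan_cons (p : Int → Bool) (row : List Int) (j : Int) (L : List Int)
    (st : Option Int × Option Int) :
    pvScan p row (j :: L) st =
      pvScan p row L
        (if p j &&
            (match st.1 with
             | none => true
             | some m => decide (pvCost row j < m)) then
          (some (pvCost row j), some j)
        else st) := rfl

lemma scan_none (p : Int → Bool) (row : List Int) :
    ∀ (L : List Int) (st : Option Int × Option Int),
      (∀ k ∈ L, p k = false) → pvScan p row L st = st := by
  intro L
  induction L with
  | nil => intro st _; rfl
  | cons j t ih =>
    intro st h
    rw [pvScan_cons, if_neg (by simp [h j (by simp)])]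
    exact ih st (fun k hk => h k (by simp [hk]))

lemma scan_best (p : Int → Bool) (row : List Int) :
    ∀ (L : List Int) (j0 : Int), p j0 = true → (∀ k ∈ L, j0 < k) →
      L.Pairwise (· < ·) →
      ∃ j', pvScan p row L (some (pvCost row j0), some j0) = (some (pvCost row j'), some j') ∧
        p j' = true ∧ (j' = j0 ∨ j' ∈ L) ∧ pvKey row j' ≤ pvKey row j0 ∧
        ∀ k ∈ L, p k = true → pvKey row j' ≤ pvKey row k := by
  intro L
  induction L with
  | nil =>
    intro j0 hp0 _ _
    exact ⟨j0, rfl, hp0, Or.inl rfl, le_refl _, by simp⟩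
  | cons j t ih =>
    intro j0 hp0 hlt hpw
    obtain ⟨hhead, htail⟩ := List.pairwise_cons.1 hpw
    rw [pvScan_cons]
    by_cases hpj : p j = true
    · by_cases hclt : pvCost row j < pvCost row j0
      · rw [if_pos (by simp [hpj, hclt])]
        obtain ⟨j', h1, h2, h3, h4, h5⟩ := ih j hpj hhead htail
        have hkey : pvKey row j ≤ pvKey row j0 := by
          unfold pvKey
          exact le_of_lt (Prod.Lex.toLex_lt_toLex.2 (Or.inl hclt))
        refine ⟨j', h1, h2, Or.inr ?_, le_trans h4 hkey, ?_⟩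
        · rcases h3 with h | h <;> simp [h]
        · intro k hk hpk
          rcases List.mem_cons.1 hk with rfl | hk
          · exact h4
          · exact h5 k hk hpk
      · rw [if_neg (by simp [hclt])]
        obtain ⟨j', h1, h2, h3, h4, h5⟩ :=
          ih j0 hp0 (fun k hk => hlt k (List.mem_cons_of_mem _ hk)) htail
        have hkey : pvKey row j0 ≤ pvKey row j := by
          unfold pvKey
          rw [Prod.Lex.toLex_le_toLex]
          rcases lt_or_eq_of_le (not_lt.1 hclt) with h | h
          · exact Or.inl h
          · exact Or.inr ⟨h, le_of_lt (hlt j (by simp))⟩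
        refine ⟨j', h1, h2, ?_, h4, ?_⟩
        · rcases h3 with h | h <;> simp [h]
        · intro k hk hpk
          rcases List.mem_cons.1 hk with rfl | hk
          · exact le_trans h4 hkey
          · exact h5 k hk hpk
    · rw [if_neg (by simp [hpj])]
      obtain ⟨j', h1, h2, h3, h4, h5⟩ :=
        ih j0 hp0 (fun k hk => hlt k (List.mem_cons_of_mem _ hk)) htail
      refine ⟨j', h1, h2, ?_, h4, ?_⟩
      · rcases h3 with h | h <;> simp [h]
      · intro k hk hpk
        rcases List.mem_cons.1 hk with rfl | hk
        · exact absurd hpk hpj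
        · exact h5 k hk hpk

lemma scan_start (p : Int → Bool) (row : List Int) :
    ∀ (L : List Int), L.Pairwise (· < ·) →
      (∀ k ∈ L, p k = false) ∨
      ∃ j', pvScan p row L (none, none) = (some (pvCost row j'), some j') ∧
        p j' = true ∧ j' ∈ L ∧ ∀ k ∈ L, p k = true → pvKey row j' ≤ pvKey row k := by
  intro L
  induction L with
  | nil => intro _; exact Or.inl (by simp)
  | cons j t ih =>
    intro hpw
    obtain ⟨hhead, htail⟩ := List.pairwise_cons.1 hpw
    rw [pvScan_cons]
    by_cases hpj : p j = true
    · rw [if_pos (by simp [hpj])]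
      obtain ⟨j', h1, h2, h3, h4, h5⟩ := scan_best p row t j hpj hhead htail
      refine Or.inr ⟨j', h1, h2, ?_, ?_⟩
      · rcases h3 with h | h <;> simp [h]
      · intro k hk hpk
        rcases List.mem_cons.1 hk with rfl | hk
        · exact h4
        · exact h5 k hk hpk
    · rw [if_neg (by simp [hpj])]
      rcases ih htail with h | ⟨j', h1, h2, h3, h4⟩
      · refine Or.inl (fun k hk => ?_)
        rcases List.mem_cons.1 hk with rfl | hk
        · simpa using hpj
        · exact h k hk
      · refine Or.inr ⟨j', h1, h2, List.mem_cons_of_mem _ h3, ?_⟩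
        intro k hk hpk
        rcases List.mem_cons.1 hk with rfl | hk
        · exact absurd hpk hpj
        · exact h4 k hk hpk

-- the heart: A's strict-< min scan over an ascending index list picks exactly the first
-- available person of the (cost, index)-sorted preference list
lemma row_choice (row : List Int) (p q : Int → Bool) (L : List Int)
    (hL : L.Pairwise (· < ·)) (hpq : ∀ j ∈ L, p j = q j) :
    (pvScan p row L (none, none)).2 =
      (PySem.List.sorted2 L (fun j => PySem.List.pyGetD row j 0) (fun j => j)).find? q := by
  have hs2 := sorted2_eq_sorted_lex L (fun j => PySem.List.pyGetD row j 0) (fun j => j)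
  rw [hs2]
  set S := PySem.List.sorted L (fun a => toLex (PySem.List.pyGetD row a 0, a)) with hSdef
  have hperm : S.Perm L := PySem.List.sorted_perm _ _ _
  have hndL : L.Nodup := hL.imp (fun h => ne_of_lt h)
  have hndS : S.Nodup := hperm.nodup_iff.2 hndL
  have hle : S.Pairwise (fun a b => pvKey row a ≤ pvKey row b) :=
    PySem.List.sorted_pairwise L (fun a => toLex (PySem.List.pyGetD row a 0, a))
  have hlt : S.Pairwise (fun a b => pvKey row a < pvKey row b) :=
    (hle.and hndS).imp (fun h => lt_of_le_of_ne h.1 (fun he => h.2 (pvKey_inj row _ _ he)))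
  rw [← find?_congr_mem S (fun x hx => hpq x (hperm.subset hx))]
  rcases scan_start p row L hL with hall | ⟨j', h1, h2, h3, h4⟩
  · rw [scan_none p row L _ hall]
    symm
    rw [List.find?_eq_none]
    intro x hx
    simp [hall x (hperm.subset hx)]
  · rw [h1]
    cases hfind : S.find? p with
    | none =>
      rw [List.find?_eq_none] at hfind
      exact absurd h2 (by simpa using hfind j' (hperm.mem_iff.2 h3))
    | some j'' =>
      obtain ⟨hq1, hq2, hq3⟩ := find?_min_of_pairwise (pvKey row) p S hlt j'' hfind
      have e1 : pvKey row j' ≤ pvKey row j'' := h4 j'' (hperm.subset hq2) hq1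
      have e2 : pvKey row j'' ≤ pvKey row j' := hq3 j' (hperm.mem_iff.2 h3) h2
      have hji : j'' = j' := pvKey_inj row j'' j' (le_antisymm e2 e1)
      simp [hji]

lemma range_pairwise (n : Nat) : (PySem.List.pyRange 0 (n : Int)).Pairwise (· < ·) := by
  rw [PySem.List.pyRange_zero_natCast]
  exact List.pairwise_lt_range.map _ (fun a b h => by exact_mod_cast h)

lemma mem_range_iff (n : Nat) (j : Int) :
    j ∈ PySem.List.pyRange 0 (n : Int) ↔ ∃ k : Nat, k < n ∧ j = (k : Int) := by
  rw [PySem.List.pyRange_zero_natCast]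
  simp only [List.mem_map, List.mem_range]
  constructor
  · rintro ⟨k, hk, rfl⟩; exact ⟨k, hk, rfl⟩
  · rintro ⟨k, hk, rfl⟩; exact ⟨k, hk, rfl⟩

lemma contains_iff (s : PySem.Set Int) (x : Int) : PySem.Set.contains s x = true ↔ x ∈ s := by
  simp [PySem.Set.contains]

lemma nodup_length_le (l1 l2 : List Int) (h : l1.Nodup) (hs : l1 ⊆ l2) :
    l1.length ≤ l2.length := by
  calc l1.length = l1.toFinset.card := (List.toFinset_card_of_nodup h).symm
    _ ≤ l2.toFinset.card := Finset.card_le_card (by intro x hx; simp at hx ⊢; exact hs hx)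
    _ ≤ l2.length := l2.toFinset_card_le

lemma outer_invariant (n : Nat) :
    ∀ (r : List (List Int)) (usadas : List Bool) (used : PySem.Set Int) (acc : List Int),
      usadas.length = n →
      (∀ k : Nat, k < n → usadas.getD k false = PySem.Set.contains used (k : Int)) →
      used.Nodup →
      (∀ x ∈ used, ∃ k : Nat, k < n ∧ x = (k : Int)) →
      used.length + r.length ≤ n →
      (r.foldl (pvFA n) (acc, usadas)).1 = (r.foldl (pvFB n) (used, acc)).2 := by
  intro r
  induction r with
  | nil => intro usadas used acc _ _ _ _ _; rfl
  | cons row r ih =>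
    intro usadas used acc hlen hcorr hnd hsub hcount
    simp only [List.length_cons] at hcount
    have hfree : ∃ k : Nat, k < n ∧ usadas.getD k false = false := by
      by_contra hco
      push Not at hco
      have hsub2 : ((List.range n).map (fun k => ((k : Nat) : Int))) ⊆ used := by
        intro x hx
        simp only [List.mem_map, List.mem_range] at hx
        obtain ⟨k, hk, rfl⟩ := hx
        have ht : usadas.getD k false = true := by
          cases hb : usadas.getD k false
          · exact absurd hb (hco k hk)
          · rfl
        have hc := hcorr k hk
        rw [ht] at hc
        exact (contains_iff used _).1 hc.symm
      have hndr : ((List.range n).map (fun k => ((k : Nat) : Int))).Nodup :=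
        List.Nodup.map Nat.cast_injective List.nodup_range
      have hlen2 := nodup_length_le _ _ hndr hsub2
      simp only [List.length_map, List.length_range] at hlen2
      omega
    obtain ⟨kf, hkfn, hkffree⟩ := hfree
    have hpq : ∀ j ∈ PySem.List.pyRange 0 (n : Int),
        (fun j => !(PySem.List.pyGetD usadas j false)) j
          = (fun j => !(PySem.Set.contains used j)) j := by
      intro j hj
      obtain ⟨k, hk, rfl⟩ := (mem_range_iff n j).1 hj
      simp only [PySem.List.pyGetD_natCast]
      rw [hcorr k hk]
    rcases scan_start (fun j => !(PySem.List.pyGetD usadas j false)) row _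
        (range_pairwise n) with hall | ⟨js, h1, h2, h3, h4⟩
    · exfalso
      have hbad := hall (kf : Int) ((mem_range_iff n _).2 ⟨kf, hkfn, rfl⟩)
      simp only [PySem.List.pyGetD_natCast] at hbad
      rw [hkffree] at hbad
      simp at hbad
    · obtain ⟨ks, hksn, rfl⟩ := (mem_range_iff n js).1 h3
      have hfree_s : usadas.getD ks false = false := by
        have h2' := h2
        simp only [PySem.List.pyGetD_natCast] at h2'
        simpa using h2'
      have hnotmem : ((ks : Nat) : Int) ∉ used := by
        intro hm
        have hc := hcorr ks hksn
        rw [hfree_s, (contains_iff used _).2 hm] at hc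
        exact absurd hc (by decide)
      have hchoice := row_choice row (fun j => !(PySem.List.pyGetD usadas j false))
        (fun j => !(PySem.Set.contains used j)) _ (range_pairwise n) hpq
      have hA : pvFA n (acc, usadas) row = (acc ++ [((ks : Nat) : Int)], usadas.set ks true) := by
        show (match (pvScan (fun j => !(PySem.List.pyGetD usadas j false)) row
            (PySem.List.pyRange 0 (n : Int)) (none, none)).2 with
          | some j => (acc ++ [j], usadas.set j.toNat true)
          | none => (acc ++ [0], usadas)) = _
        rw [h1]
        simp
      have hfq : (PySem.List.sorted2 (PySem.List.pyRange 0 (n : Int))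
            (fun j => PySem.List.pyGetD row j 0) (fun j => j)).find?
            (fun j => !(PySem.Set.contains used j)) = some ((ks : Nat) : Int) := by
        rw [← hchoice, h1]
      have hadd : PySem.Set.add used ((ks : Nat) : Int) = used ++ [((ks : Nat) : Int)] := by
        unfold PySem.Set.add
        rw [if_neg]
        intro hcon
        exact hnotmem ((contains_iff used _).1 hcon)
      have hB : pvFB n (used, acc) row = (used ++ [((ks : Nat) : Int)], acc ++ [((ks : Nat) : Int)]) := by
        show (match (PySem.List.sorted2 (PySem.List.pyRange 0 (n : Int))
            (fun j => PySem.List.pyGetD row j 0) (fun j => j)).find?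
            (fun j => !(PySem.Set.contains used j)) with
          | some j => (PySem.Set.add used j, acc ++ [j])
          | none => (used, acc)) = _
        rw [hfq]
        simp [hadd]
      rw [List.foldl_cons, List.foldl_cons, hA, hB]
      apply ih
      · rw [List.length_set]; exact hlen
      · intro k hk
        by_cases hkk : k = ks
        · subst hkk
          rw [List.getD_eq_getElem _ _ (by rw [List.length_set, hlen]; exact hk)]
          rw [List.getElem_set_self]
          exact ((contains_iff _ _).2 (by simp)).symm
        · have hne : ((k : Nat) : Int) ≠ ((ks : Nat) : Int) := by exact_mod_cast hkk
          have hLHS : (usadas.set ks true).getD k false = usadas.getD k false := by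
            rw [List.getD_eq_getElem _ _ (by rw [List.length_set, hlen]; exact hk),
              List.getD_eq_getElem _ _ (by rw [hlen]; exact hk)]
            exact List.getElem_set_ne (fun h => hkk h.symm) _
          have hRHS : PySem.Set.contains (used ++ [((ks : Nat) : Int)]) ((k : Nat) : Int)
              = PySem.Set.contains used ((k : Nat) : Int) := by
            rw [Bool.eq_iff_iff, contains_iff, contains_iff, List.mem_append]
            simp [hne]
          rw [hLHS, hRHS]
          exact hcorr k hk
      · simp only [List.nodup_append, List.nodup_singleton, true_and]
        refine ⟨hnd, ?_⟩
        intro a ha b hb hab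
        rw [List.mem_singleton] at hb
        rw [hab, hb] at ha
        exact hnotmem ha
      · intro x hx
        rcases List.mem_append.1 hx with hx | hx
        · exact hsub x hx
        · simp at hx
          exact ⟨ks, hksn, hx⟩
      · simp only [List.length_append, List.length_singleton]
        omega

lemma ports_agree (custos : List (List Int)) :
    aloca_trabalhos custos = aloca_trabalhos_alt custos := by
  rw [portA_eq, portB_eq]
  exact outer_invariant custos.length custos (List.replicate custos.length false)
    PySem.Set.empty []
    (List.length_replicate)
    (fun k hk => by simp [List.getD, PySem.Set.contains, PySem.Set.empty])
    (List.nodup_nil)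
    (fun x hx => absurd hx (List.not_mem_nil))
    (by simp)

-- ===== VERDICT (by name: the statement is the Claim_ definition above) =====
theorem aloca_trabalhos_spec : Claim_equal_aloca_trabalhos := by
  intro custos _ _
  unfold Spec_aloca_trabalhos
  exact ports_agree custos
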